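-- pv_equiv track=rewrite | github.com/fbittmann/Python | Codebeispiele und Loesungen/2_countdown.py | countdown1
-- ===== SOURCE A (Python) =====
-- def countdown1(n, counter=0, sequenz=""):
-- 	if n == 1:
-- 		return (counter, sequenz)
-- 	counter += 1
-- 	results = []
-- 	if n % 2 == 0:
-- 		results.append(countdown1(n // 2, counter, sequenz + "2"))
-- 	if n % 3 == 0:
-- 		results.append(countdown1(n // 3, counter, sequenz + "3"))
-- 	results.append(countdown1(n - 1, counter, sequenz + "1"))
-- 	return min(results)
-- ===== SOURCE B (Python) =====
-- def countdown1(n, counter=0, sequenz=""):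
--     # bottom-up dynamic programming over 1..n instead of exponential recursion
--     best = [(0, ""), (0, "")]  # best[0] is a dummy; best[1] = (0 steps, empty suffix)
--     for m in range(2, n + 1):
--         opts = []
--         if m % 2 == 0:
--             s2, t2 = best[m // 2]
--             opts.append((s2 + 1, "2" + t2))
--         if m % 3 == 0:
--             s3, t3 = best[m // 3]
--             opts.append((s3 + 1, "3" + t3))
--         s1, t1 = best[m - 1]
--         opts.append((s1 + 1, "1" + t1))
--         best.append(min(opts))
--     s, t = best[n]
--     return (counter + s, sequenz + t)
-- ===== Notes on version B (the rewrite author's own statement) =====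
-- stated objective: faster
-- what changed: replaces A's exponential branching recursion by a bottom-up dynamic-programming table best[1..n] of (steps, suffix) pairs filled once in one pass, reading off (counter+steps, sequenz+suffix) at the end
import Mathlib
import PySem

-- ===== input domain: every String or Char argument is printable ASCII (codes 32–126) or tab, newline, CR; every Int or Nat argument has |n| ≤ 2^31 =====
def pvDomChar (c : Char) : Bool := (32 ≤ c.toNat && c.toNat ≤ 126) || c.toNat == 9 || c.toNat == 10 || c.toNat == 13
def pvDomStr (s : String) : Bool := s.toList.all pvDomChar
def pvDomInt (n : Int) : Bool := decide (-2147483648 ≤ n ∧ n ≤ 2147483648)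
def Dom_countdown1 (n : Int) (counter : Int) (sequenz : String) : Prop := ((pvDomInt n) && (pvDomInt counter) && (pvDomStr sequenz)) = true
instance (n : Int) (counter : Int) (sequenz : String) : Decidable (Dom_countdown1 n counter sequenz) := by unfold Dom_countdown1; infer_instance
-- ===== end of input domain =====

-- B replaces A's exponential branching recursion by a bottom-up dynamic-programming
-- table of (steps, suffix) per value 1..n (objective: faster).

-- ===== PORT A =====
-- A's recursion on n; the fuel argument only makes it total (fuel = n.toNat suffices
-- for every n ≥ 1, the inputs Pre_ admits; Python raises RecursionError for n ≤ 0).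
def countdown1Go : Nat → Int → Int → List Char → Int × List Char
  | 0, _, counter, sequenz => (counter, sequenz)
  | fuel + 1, n, counter, sequenz =>
    if n = 1 then (counter, sequenz)
    else
      let counter := counter + 1
      let results : List (Int × List Char) :=
        (if PySem.Int.mod n 2 = 0 then
            [countdown1Go fuel (PySem.Int.floordiv n 2) counter (sequenz ++ ['2'])] else [])
        ++ (if PySem.Int.mod n 3 = 0 then
            [countdown1Go fuel (PySem.Int.floordiv n 3) counter (sequenz ++ ['3'])] else [])
        ++ [countdown1Go fuel (n - 1) counter (sequenz ++ ['1'])]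
      -- min(results): Python's tuple order = lexicographic on (Int, str)
      (PySem.List.min2? results (·.1) (·.2)).getD (counter, sequenz)

def countdown1 (n : Int) (counter : Int) (sequenz : String) : Int × String :=
  let r := countdown1Go n.toNat n counter sequenz.toList
  (r.1, String.ofList r.2)

-- ===== PORT B =====
-- one DP step: best.append(min(opts)) with opts read from earlier table entries
def countdown1AltStep (best : List (Int × List Char)) (m : Int) : List (Int × List Char) :=
  let opts : List (Int × List Char) :=
    (if PySem.Int.mod m 2 = 0 then
        let p := PySem.List.pyGetD best (PySem.Int.floordiv m 2) (0, [])
        [(p.1 + 1, '2' :: p.2)] else [])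
    ++ (if PySem.Int.mod m 3 = 0 then
        let p := PySem.List.pyGetD best (PySem.Int.floordiv m 3) (0, [])
        [(p.1 + 1, '3' :: p.2)] else [])
    ++ (let p := PySem.List.pyGetD best (m - 1) (0, [])
        [(p.1 + 1, '1' :: p.2)])
  best ++ [(PySem.List.min2? opts (·.1) (·.2)).getD (0, [])]

def countdown1_alt (n : Int) (counter : Int) (sequenz : String) : Int × String :=
  let best := (PySem.List.pyRange 2 (n + 1)).foldl countdown1AltStep [(0, []), (0, [])]
  let p := PySem.List.pyGetD best n (0, [])
  (counter + p.1, String.ofList (sequenz.toList ++ p.2))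

-- ===== PRECONDITION & SPEC =====
-- Pre_ excludes n ≤ 0, on which Python A recurses forever (RecursionError); A returns on every n ≥ 1.
def Pre_countdown1 (n : Int) (counter : Int) (sequenz : String) : Prop := 1 ≤ n
instance (n : Int) (counter : Int) (sequenz : String) : Decidable (Pre_countdown1 n counter sequenz) := by unfold Pre_countdown1; infer_instance
def pvWitness_countdown1 : Int × Int × String := (10, 0, "")

def Spec_countdown1 (n : Int) (counter : Int) (sequenz : String) (out : Int × String) : Prop := out = countdown1_alt n counter sequenz
instance (n : Int) (counter : Int) (sequenz : String) (out : Int × String) : Decidable (Spec_countdown1 n counter sequenz out) := by unfold Spec_countdown1; infer_instance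

-- ===== CLAIM (what is proved, stated in full; the proofs are below) =====
def Claim_equal_countdown1 : Prop := ∀ (n : Int) (counter : Int) (sequenz : String), Dom_countdown1 n counter sequenz → Pre_countdown1 n counter sequenz → Spec_countdown1 n counter sequenz (countdown1 n counter sequenz)

-- ===== LEMMAS AND PROOFS =====

-- the common value both ports compute: pvH k = (min #steps from k down to 1, best op-suffix)
def pvH : Nat → Int × List Char
  | 0 => (0, [])
  | 1 => (0, [])
  | (k + 2) =>
    let opts : List (Int × List Char) :=
      (if (k + 2) % 2 = 0 then [((pvH ((k + 2) / 2)).1 + 1, '2' :: (pvH ((k + 2) / 2)).2)] else [])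
      ++ (if (k + 2) % 3 = 0 then [((pvH ((k + 2) / 3)).1 + 1, '3' :: (pvH ((k + 2) / 3)).2)] else [])
      ++ [((pvH (k + 1)).1 + 1, '1' :: (pvH (k + 1)).2)]
    (PySem.List.min2? opts (·.1) (·.2)).getD (0, [])
  decreasing_by all_goals omega

def pvShift (c : Int) (s : List Char) (p : Int × List Char) : Int × List Char := (c + p.1, s ++ p.2)

theorem pv_append_lt_append (s t u : List Char) : s ++ t < s ++ u ↔ t < u := by
  induction s with
  | nil => simp
  | cons a s ih => simpa [List.cons_lt_cons_iff] using ih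

theorem pv_min2_singleton (m : Int × List Char) :
    PySem.List.min2? [m] (·.1) (·.2) = some m := by
  simp [PySem.List.min2?]

theorem pv_min2_cons_cons (m x : Int × List Char) (t : List (Int × List Char)) :
    PySem.List.min2? (m :: x :: t) (·.1) (·.2)
      = PySem.List.min2? ((if x.1 < m.1 ∨ (¬ m.1 < x.1 ∧ x.2 < m.2) then x else m) :: t) (·.1) (·.2) := by
  by_cases h1 : x.1 < m.1
  · simp [PySem.List.min2?, h1]
  · by_cases h2 : m.1 < x.1
    · have h4 : ¬ x.1 ≤ m.1 := by omega
      simp [PySem.List.min2?, h1, h2, h4]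
    · have h4 : x.1 ≤ m.1 := by omega
      by_cases h3 : x.2 < m.2 <;> simp [PySem.List.min2?, h1, h2, h3, h4]

theorem pv_min2_some (t : List (Int × List Char)) :
    ∀ m : Int × List Char, ∃ r, PySem.List.min2? (m :: t) (·.1) (·.2) = some r := by
  induction t with
  | nil => intro m; exact ⟨m, pv_min2_singleton m⟩
  | cons x t ih => intro m; rw [pv_min2_cons_cons]; exact ih _

theorem pv_min2_shift (c : Int) (s : List Char) :
    ∀ (l : List (Int × List Char)) (m : Int × List Char),
    PySem.List.min2? (pvShift c s m :: l.map (pvShift c s)) (·.1) (·.2)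
      = (PySem.List.min2? (m :: l) (·.1) (·.2)).map (pvShift c s) := by
  intro l
  induction l with
  | nil => intro m; rw [List.map_nil, pv_min2_singleton, pv_min2_singleton]; rfl
  | cons x t ih =>
    intro m
    rw [List.map_cons, pv_min2_cons_cons, pv_min2_cons_cons]
    have hcond : ((pvShift c s x).1 < (pvShift c s m).1
          ∨ (¬ (pvShift c s m).1 < (pvShift c s x).1 ∧ (pvShift c s x).2 < (pvShift c s m).2))
        ↔ (x.1 < m.1 ∨ (¬ m.1 < x.1 ∧ x.2 < m.2)) := by
      simp [pvShift, pv_append_lt_append]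
    rw [if_congr hcond rfl rfl, ← apply_ite (pvShift c s), ih]

theorem pv_min_shift_getD (c : Int) (s : List Char) (m : Int × List Char) (l : List (Int × List Char)) :
    (PySem.List.min2? (pvShift c s m :: l.map (pvShift c s)) (·.1) (·.2)).getD (c + 1, s)
      = (c + ((PySem.List.min2? (m :: l) (·.1) (·.2)).getD (0, [])).1,
         s ++ ((PySem.List.min2? (m :: l) (·.1) (·.2)).getD (0, [])).2) := by
  obtain ⟨r, hr⟩ := pv_min2_some l m
  rw [pv_min2_shift, hr]
  simp [pvShift]

theorem pvH_eq (k : Nat) (hk : 2 ≤ k) :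
    pvH k =
      (PySem.List.min2?
        ((if k % 2 = 0 then [((pvH (k / 2)).1 + 1, '2' :: (pvH (k / 2)).2)] else [])
          ++ (if k % 3 = 0 then [((pvH (k / 3)).1 + 1, '3' :: (pvH (k / 3)).2)] else [])
          ++ [((pvH (k - 1)).1 + 1, '1' :: (pvH (k - 1)).2)]) (·.1) (·.2)).getD (0, []) := by
  obtain ⟨j, rfl⟩ : ∃ j, k = j + 2 := ⟨k - 2, by omega⟩
  have h1 : j + 2 - 1 = j + 1 := by omega
  rw [pvH, h1]

theorem pv_goA (fuel : Nat) : ∀ (n c : Int) (s : List Char), 1 ≤ n → n.toNat ≤ fuel →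
    countdown1Go fuel n c s = (c + (pvH n.toNat).1, s ++ (pvH n.toNat).2) := by
  induction fuel with
  | zero => intro n c s h1 h2; omega
  | succ fuel ih =>
    intro n c s h1 h2
    by_cases hn1 : n = 1
    · subst hn1
      simp [countdown1Go, pvH]
    · have h2n : 2 ≤ n := by omega
      have hk2 : 2 ≤ n.toNat := by omega
      have hnk : n = ((n.toNat : Nat) : Int) := (Int.toNat_of_nonneg (by omega)).symm
      set k := n.toNat with hkdef
      have hm2 : PySem.Int.mod n 2 = ((k % 2 : Nat) : Int) := by
        rw [hnk]; exact_mod_cast PySem.Int.mod_natCast k 2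
      have hm3 : PySem.Int.mod n 3 = ((k % 3 : Nat) : Int) := by
        rw [hnk]; exact_mod_cast PySem.Int.mod_natCast k 3
      have hd2 : PySem.Int.floordiv n 2 = ((k / 2 : Nat) : Int) := by
        rw [hnk]; exact_mod_cast PySem.Int.floordiv_natCast k 2
      have hd3 : PySem.Int.floordiv n 3 = ((k / 3 : Nat) : Int) := by
        rw [hnk]; exact_mod_cast PySem.Int.floordiv_natCast k 3
      have hs1 : n - 1 = ((k - 1 : Nat) : Int) := by omega
      have hc1 : countdown1Go fuel (n - 1) (c + 1) (s ++ ['1'])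
          = pvShift c s ((pvH (k - 1)).1 + 1, '1' :: (pvH (k - 1)).2) := by
        rw [hs1, ih _ _ _ (by omega) (by omega)]
        simp only [Int.toNat_natCast, pvShift, List.append_assoc, List.singleton_append, Prod.mk.injEq]
        constructor
        · omega
        · trivial
      have hc2 : k % 2 = 0 → countdown1Go fuel (PySem.Int.floordiv n 2) (c + 1) (s ++ ['2'])
          = pvShift c s ((pvH (k / 2)).1 + 1, '2' :: (pvH (k / 2)).2) := by
        intro _
        rw [hd2, ih _ _ _ (by omega) (by omega)]
        simp only [Int.toNat_natCast, pvShift, List.append_assoc, List.singleton_append, Prod.mk.injEq]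
        constructor
        · omega
        · trivial
      have hc3 : k % 3 = 0 → countdown1Go fuel (PySem.Int.floordiv n 3) (c + 1) (s ++ ['3'])
          = pvShift c s ((pvH (k / 3)).1 + 1, '3' :: (pvH (k / 3)).2) := by
        intro h3
        have : 3 ≤ k := by omega
        rw [hd3, ih _ _ _ (by omega) (by omega)]
        simp only [Int.toNat_natCast, pvShift, List.append_assoc, List.singleton_append, Prod.mk.injEq]
        constructor
        · omega
        · trivial
      simp only [countdown1Go, if_neg hn1]
      rw [pvH_eq k hk2]
      by_cases hb2 : k % 2 = 0 <;> by_cases hb3 : k % 3 = 0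
      · have hcond2 : PySem.Int.mod n 2 = 0 := by rw [hm2]; omega
        have hcond3 : PySem.Int.mod n 3 = 0 := by rw [hm3]; omega
        rw [if_pos hcond2, if_pos hcond3, if_pos hb2, if_pos hb3,
          hc1, hc2 hb2, hc3 hb3]
        simp only [List.append_assoc, List.singleton_append]
        exact pv_min_shift_getD c s _ [_, _]
      · have hcond2 : PySem.Int.mod n 2 = 0 := by rw [hm2]; omega
        have hcond3 : ¬ PySem.Int.mod n 3 = 0 := by rw [hm3]; omega
        rw [if_pos hcond2, if_neg hcond3, if_pos hb2, if_neg hb3,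
          hc1, hc2 hb2]
        simp only [List.append_assoc, List.singleton_append, List.nil_append]
        exact pv_min_shift_getD c s _ [_]
      · have hcond2 : ¬ PySem.Int.mod n 2 = 0 := by rw [hm2]; omega
        have hcond3 : PySem.Int.mod n 3 = 0 := by rw [hm3]; omega
        rw [if_neg hcond2, if_pos hcond3, if_neg hb2, if_pos hb3,
          hc1, hc3 hb3]
        simp only [List.append_assoc, List.singleton_append, List.nil_append]
        exact pv_min_shift_getD c s _ [_]
      · have hcond2 : ¬ PySem.Int.mod n 2 = 0 := by rw [hm2]; omega
        have hcond3 : ¬ PySem.Int.mod n 3 = 0 := by rw [hm3]; omega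
        rw [if_neg hcond2, if_neg hcond3, if_neg hb2, if_neg hb3, hc1]
        simp only [List.append_assoc, List.singleton_append, List.nil_append]
        exact pv_min_shift_getD c s _ []

theorem pv_step_next (t : List (Int × List Char)) (k : Nat) (hk : 1 ≤ k)
    (hlen : t.length = k + 1)
    (hval : ∀ j : Nat, 1 ≤ j → j ≤ k → t.getD j (0, []) = pvH j) :
    countdown1AltStep t ((k : Int) + 1) = t ++ [pvH (k + 1)] := by
  have hK2 : 2 ≤ k + 1 := by omega
  have hg : ∀ j : Nat, 1 ≤ j → j ≤ k → PySem.List.pyGetD t ((j : Nat) : Int) (0, []) = pvH j := by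
    intro j hj1 hj2
    rw [PySem.List.pyGetD_natCast]
    exact hval j hj1 hj2
  have hcast : (k : Int) + 1 = ((k + 1 : Nat) : Int) := by push_cast; ring
  unfold countdown1AltStep
  rw [hcast, pvH_eq (k + 1) hK2]
  have hm2 : PySem.Int.mod ((k + 1 : Nat) : Int) 2 = (((k + 1) % 2 : Nat) : Int) := by
    exact_mod_cast PySem.Int.mod_natCast (k + 1) 2
  have hm3 : PySem.Int.mod ((k + 1 : Nat) : Int) 3 = (((k + 1) % 3 : Nat) : Int) := by
    exact_mod_cast PySem.Int.mod_natCast (k + 1) 3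
  have hd2 : PySem.Int.floordiv ((k + 1 : Nat) : Int) 2 = (((k + 1) / 2 : Nat) : Int) := by
    exact_mod_cast PySem.Int.floordiv_natCast (k + 1) 2
  have hd3 : PySem.Int.floordiv ((k + 1 : Nat) : Int) 3 = (((k + 1) / 3 : Nat) : Int) := by
    exact_mod_cast PySem.Int.floordiv_natCast (k + 1) 3
  have hs1 : ((k + 1 : Nat) : Int) - 1 = ((k : Nat) : Int) := by push_cast; ring
  rw [hs1, hg k hk (le_refl k)]
  by_cases hb2 : (k + 1) % 2 = 0 <;> by_cases hb3 : (k + 1) % 3 = 0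
  · have hcond2 : PySem.Int.mod ((k + 1 : Nat) : Int) 2 = 0 := by rw [hm2]; omega
    have hcond3 : PySem.Int.mod ((k + 1 : Nat) : Int) 3 = 0 := by rw [hm3]; omega
    rw [if_pos hcond2, if_pos hcond3, if_pos hb2, if_pos hb3,
      hd2, hd3, hg ((k + 1) / 2) (by omega) (by omega), hg ((k + 1) / 3) (by omega) (by omega)]
    simp
  · have hcond2 : PySem.Int.mod ((k + 1 : Nat) : Int) 2 = 0 := by rw [hm2]; omega
    have hcond3 : ¬ PySem.Int.mod ((k + 1 : Nat) : Int) 3 = 0 := by rw [hm3]; omega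
    rw [if_pos hcond2, if_neg hcond3, if_pos hb2, if_neg hb3,
      hd2, hg ((k + 1) / 2) (by omega) (by omega)]
    simp
  · have hcond2 : ¬ PySem.Int.mod ((k + 1 : Nat) : Int) 2 = 0 := by rw [hm2]; omega
    have hcond3 : PySem.Int.mod ((k + 1 : Nat) : Int) 3 = 0 := by rw [hm3]; omega
    rw [if_neg hcond2, if_pos hcond3, if_neg hb2, if_pos hb3,
      hd3, hg ((k + 1) / 3) (by omega) (by omega)]
    simp
  · have hcond2 : ¬ PySem.Int.mod ((k + 1 : Nat) : Int) 2 = 0 := by rw [hm2]; omega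
    have hcond3 : ¬ PySem.Int.mod ((k + 1 : Nat) : Int) 3 = 0 := by rw [hm3]; omega
    rw [if_neg hcond2, if_neg hcond3, if_neg hb2, if_neg hb3]
    simp

theorem pv_tableInv (k : Nat) (hk : 1 ≤ k) :
    ((PySem.List.pyRange 2 ((k : Int) + 1)).foldl countdown1AltStep [(0, []), (0, [])]).length = k + 1
    ∧ ∀ j : Nat, 1 ≤ j → j ≤ k →
      ((PySem.List.pyRange 2 ((k : Int) + 1)).foldl countdown1AltStep [(0, []), (0, [])]).getD j (0, []) = pvH j := by
  induction k, hk using Nat.le_induction with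
  | base =>
    have h0 : PySem.List.pyRange 2 (((1 : Nat) : Int) + 1) = [] := by decide
    rw [h0]
    refine ⟨rfl, ?_⟩
    intro j h1 h2
    have hj : j = 1 := by omega
    subst hj
    simp [pvH]
  | succ k hk ih =>
    obtain ⟨hlen, hval⟩ := ih
    have hcast : ((k + 1 : Nat) : Int) + 1 = ((k : Int) + 1) + 1 := by push_cast; ring
    rw [hcast, PySem.List.pyRange_one_succ_right (by omega), List.foldl_append,
      List.foldl_cons, List.foldl_nil, pv_step_next _ k hk hlen hval]
    constructor
    · simp [hlen]
    · intro j h1 h2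
      by_cases hj : j ≤ k
      · rw [List.getD_append _ _ _ _ (by omega)]
        exact hval j h1 hj
      · have hj1 : j = k + 1 := by omega
        subst hj1
        rw [List.getD_append_right _ _ _ _ (by omega), hlen]
        simp

-- ===== VERDICT (by name: the statement is the Claim_ definition above) =====
theorem countdown1_spec : Claim_equal_countdown1 := by
  unfold Claim_equal_countdown1
  intro n c s _ hpre
  unfold Pre_countdown1 at hpre
  unfold Spec_countdown1
  obtain ⟨k, rfl, hk1⟩ : ∃ k : Nat, n = ↑k ∧ 1 ≤ k :=
    ⟨n.toNat, (Int.toNat_of_nonneg (by omega)).symm, by omega⟩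
  obtain ⟨hlen, hval⟩ := pv_tableInv k hk1
  simp only [countdown1, countdown1_alt, Int.toNat_natCast]
  rw [pv_goA k (↑k) c s.toList (by exact_mod_cast hk1) (by simp),
    PySem.List.pyGetD_natCast, hval k hk1 (le_refl k)]
  simp
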